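-- pv_equiv track=rewrite | github.com/keema383/Quoridor_Strategic_Game | src/main.py | causes_overlap
-- ===== SOURCE A (Python) =====
-- HORIZONTAL = 'H'
--
-- VERTICAL = 'V'
--
-- def causes_overlap(new_wall, walls):
--     """
--     Check if the new wall causes improper overlap, crossing, or intersection in the middle.
--     Optimized to avoid redundant checks.
--     """
--     x, y, orientation = new_wall
--
--     for wall_x, wall_y, wall_orientation in walls:
--         if orientation == HORIZONTAL:
--             # Overlapping horizontal walls
--             if wall_orientation == HORIZONTAL and wall_y == y and abs(wall_x - x) <= 1:
--                 return True
--             # Crossing a vertical wall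
--             if wall_orientation == VERTICAL and wall_x == x + 1 and wall_y == y - 1:
--                 return True
--         elif orientation == VERTICAL:
--             # Overlapping vertical walls
--             if wall_orientation == VERTICAL and wall_x == x and abs(wall_y - y) <= 1:
--                 return True
--             # Crossing a horizontal wall
--             if wall_orientation == HORIZONTAL and wall_y == y + 1 and wall_x == x - 1:
--                 return True
--
--     return False
-- ===== SOURCE B (Python) =====
-- def causes_overlap(new_wall, walls):
--     x, y, orientation = new_wall
--     if orientation == 'H':
--         conflicts = ((x - 1, y, 'H'), (x, y, 'H'), (x + 1, y, 'H'), (x + 1, y - 1, 'V'))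
--     elif orientation == 'V':
--         conflicts = ((x, y - 1, 'V'), (x, y, 'V'), (x, y + 1, 'V'), (x - 1, y + 1, 'H'))
--     else:
--         return False
--     existing = set(walls)
--     return any(c in existing for c in conflicts)
-- ===== Notes on version B (the rewrite author's own statement) =====
-- stated objective: alternative
-- what changed: B inverts the iteration: instead of scanning every wall and testing it arithmetically against the new wall, it derives the four concrete conflicting wall tuples from new_wall alone, builds a hash set of the existing walls once, and answers with four O(1) membership lookups (no per-wall loop or arithmetic at all).
import Mathlib
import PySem

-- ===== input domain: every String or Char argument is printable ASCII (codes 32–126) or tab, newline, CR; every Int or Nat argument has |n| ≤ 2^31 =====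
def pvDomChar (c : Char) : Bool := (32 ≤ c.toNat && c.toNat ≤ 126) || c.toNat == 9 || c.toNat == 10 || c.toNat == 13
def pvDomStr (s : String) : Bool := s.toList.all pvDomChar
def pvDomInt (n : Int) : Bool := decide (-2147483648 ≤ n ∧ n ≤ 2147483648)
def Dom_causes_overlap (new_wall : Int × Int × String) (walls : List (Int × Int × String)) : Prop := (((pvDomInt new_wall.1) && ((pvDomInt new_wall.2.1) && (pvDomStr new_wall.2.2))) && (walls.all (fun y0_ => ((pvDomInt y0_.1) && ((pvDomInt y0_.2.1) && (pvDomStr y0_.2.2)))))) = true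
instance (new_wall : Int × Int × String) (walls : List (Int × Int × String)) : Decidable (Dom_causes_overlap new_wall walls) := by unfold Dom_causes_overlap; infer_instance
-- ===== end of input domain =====

-- B inverts the iteration: it derives the four conflicting wall tuples from new_wall alone,
-- builds a set of the existing walls once, and answers with four membership lookups
-- instead of scanning every wall with per-wall arithmetic (objective: alternative).

-- ===== PORT A =====
-- the loop of A: early return True on a match, False after the loop
def causesOverlapLoopA (x y : Int) (orientation : String) : List (Int × Int × String) → Bool
  | [] => false
  | (wx, wy, wo) :: rest =>
    if orientation = "H" then
      if wo = "H" ∧ wy = y ∧ (wx - x).natAbs ≤ 1 then true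
      else if wo = "V" ∧ wx = x + 1 ∧ wy = y - 1 then true
      else causesOverlapLoopA x y orientation rest
    else if orientation = "V" then
      if wo = "V" ∧ wx = x ∧ (wy - y).natAbs ≤ 1 then true
      else if wo = "H" ∧ wy = y + 1 ∧ wx = x - 1 then true
      else causesOverlapLoopA x y orientation rest
    else causesOverlapLoopA x y orientation rest

def causes_overlap (new_wall : Int × Int × String) (walls : List (Int × Int × String)) : Bool :=
  causesOverlapLoopA new_wall.1 new_wall.2.1 new_wall.2.2 walls

-- ===== PORT B =====
-- Source B: pick the four conflict tuples, build existing = set(walls), then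
-- any(c in existing for c in conflicts)
def causes_overlap_alt (new_wall : Int × Int × String) (walls : List (Int × Int × String)) : Bool :=
  let x := new_wall.1
  let y := new_wall.2.1
  let orientation := new_wall.2.2
  if orientation = "H" then
    let conflicts : List (Int × Int × String) :=
      [(x - 1, y, "H"), (x, y, "H"), (x + 1, y, "H"), (x + 1, y - 1, "V")]
    let existing : PySem.Set (Int × Int × String) := PySem.Set.ofList walls
    conflicts.any (fun c => PySem.Set.contains existing c)
  else if orientation = "V" then
    let conflicts : List (Int × Int × String) :=
      [(x, y - 1, "V"), (x, y, "V"), (x, y + 1, "V"), (x - 1, y + 1, "H")]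
    let existing : PySem.Set (Int × Int × String) := PySem.Set.ofList walls
    conflicts.any (fun c => PySem.Set.contains existing c)
  else
    false

-- ===== PRECONDITION & SPEC =====
def Spec_causes_overlap (new_wall : Int × Int × String) (walls : List (Int × Int × String)) (out : Bool) : Prop := out = causes_overlap_alt new_wall walls
instance (new_wall : Int × Int × String) (walls : List (Int × Int × String)) (out : Bool) : Decidable (Spec_causes_overlap new_wall walls out) := by unfold Spec_causes_overlap; infer_instance

-- ===== CLAIM (what is proved, stated in full; the proofs are below) =====
def Claim_equal_causes_overlap : Prop := ∀ (new_wall : Int × Int × String) (walls : List (Int × Int × String)), Dom_causes_overlap new_wall walls → Spec_causes_overlap new_wall walls (causes_overlap new_wall walls)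

-- ===== LEMMAS AND PROOFS =====

-- A's per-wall test for a horizontal new wall hits exactly the four conflict tuples
theorem memH_iff (x y wx wy : Int) (wo : String) :
    (wx, wy, wo) ∈ [((x - 1 : Int), y, ("H" : String)), (x, y, "H"), (x + 1, y, "H"), (x + 1, y - 1, "V")]
      ↔ (wo = "H" ∧ wy = y ∧ (wx - x).natAbs ≤ 1) ∨ (wo = "V" ∧ wx = x + 1 ∧ wy = y - 1) := by
  simp only [List.mem_cons, List.not_mem_nil, or_false, Prod.mk.injEq]
  constructor
  · rintro (⟨h1, h2, h3⟩ | ⟨h1, h2, h3⟩ | ⟨h1, h2, h3⟩ | ⟨h1, h2, h3⟩)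
    · exact Or.inl ⟨h3, h2, by omega⟩
    · exact Or.inl ⟨h3, h2, by omega⟩
    · exact Or.inl ⟨h3, h2, by omega⟩
    · exact Or.inr ⟨h3, h1, h2⟩
  · rintro (⟨h1, h2, h3⟩ | ⟨h1, h2, h3⟩)
    · have h : wx = x - 1 ∨ wx = x ∨ wx = x + 1 := by omega
      rcases h with h | h | h
      · exact Or.inl ⟨h, h2, h1⟩
      · exact Or.inr (Or.inl ⟨h, h2, h1⟩)
      · exact Or.inr (Or.inr (Or.inl ⟨h, h2, h1⟩))
    · exact Or.inr (Or.inr (Or.inr ⟨h2, h3, h1⟩))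

-- A's per-wall test for a vertical new wall hits exactly the four conflict tuples
theorem memV_iff (x y wx wy : Int) (wo : String) :
    (wx, wy, wo) ∈ [((x : Int), y - 1, ("V" : String)), (x, y, "V"), (x, y + 1, "V"), (x - 1, y + 1, "H")]
      ↔ (wo = "V" ∧ wx = x ∧ (wy - y).natAbs ≤ 1) ∨ (wo = "H" ∧ wy = y + 1 ∧ wx = x - 1) := by
  simp only [List.mem_cons, List.not_mem_nil, or_false, Prod.mk.injEq]
  constructor
  · rintro (⟨h1, h2, h3⟩ | ⟨h1, h2, h3⟩ | ⟨h1, h2, h3⟩ | ⟨h1, h2, h3⟩)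
    · exact Or.inl ⟨h3, h1, by omega⟩
    · exact Or.inl ⟨h3, h1, by omega⟩
    · exact Or.inl ⟨h3, h1, by omega⟩
    · exact Or.inr ⟨h3, h2, h1⟩
  · rintro (⟨h1, h2, h3⟩ | ⟨h1, h2, h3⟩)
    · have h : wy = y - 1 ∨ wy = y ∨ wy = y + 1 := by omega
      rcases h with h | h | h
      · exact Or.inl ⟨h2, h, h1⟩
      · exact Or.inr (Or.inl ⟨h2, h, h1⟩)
      · exact Or.inr (Or.inr (Or.inl ⟨h2, h, h1⟩))
    · exact Or.inr (Or.inr (Or.inr ⟨h3, h2, h1⟩))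

-- A's early-return loop decides "some wall lies in the conflict list bad"
theorem loopA_eq_any (x y : Int) (orientation : String) (bad : List (Int × Int × String))
    (hH : orientation = "H" →
      bad = [(x - 1, y, "H"), (x, y, "H"), (x + 1, y, "H"), (x + 1, y - 1, "V")])
    (hV : orientation = "V" →
      bad = [(x, y - 1, "V"), (x, y, "V"), (x, y + 1, "V"), (x - 1, y + 1, "H")])
    (hO : orientation ≠ "H" → orientation ≠ "V" → bad = [])
    (walls : List (Int × Int × String)) :
    causesOverlapLoopA x y orientation walls = walls.any (fun w => decide (w ∈ bad)) := by
  induction walls with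
  | nil => simp [causesOverlapLoopA]
  | cons w rest ih =>
    obtain ⟨wx, wy, wo⟩ := w
    rw [causesOverlapLoopA, List.any_cons, ih]
    by_cases h : orientation = "H"
    · subst h
      rw [if_pos rfl, hH rfl]
      by_cases h1 : wo = "H" ∧ wy = y ∧ (wx - x).natAbs ≤ 1
      · rw [if_pos h1, decide_eq_true ((memH_iff x y wx wy wo).mpr (Or.inl h1))]; simp
      · rw [if_neg h1]
        by_cases h2 : wo = "V" ∧ wx = x + 1 ∧ wy = y - 1
        · rw [if_pos h2, decide_eq_true ((memH_iff x y wx wy wo).mpr (Or.inr h2))]; simp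
        · rw [if_neg h2]
          have : ¬ (wx, wy, wo) ∈ [((x - 1 : Int), y, ("H" : String)), (x, y, "H"), (x + 1, y, "H"), (x + 1, y - 1, "V")] :=
            fun hm => ((memH_iff x y wx wy wo).mp hm).elim h1 h2
          simp [this]
    · rw [if_neg h]
      by_cases h' : orientation = "V"
      · subst h'
        rw [if_pos rfl, hV rfl]
        by_cases h1 : wo = "V" ∧ wx = x ∧ (wy - y).natAbs ≤ 1
        · rw [if_pos h1, decide_eq_true ((memV_iff x y wx wy wo).mpr (Or.inl h1))]; simp
        · rw [if_neg h1]
          by_cases h2 : wo = "H" ∧ wy = y + 1 ∧ wx = x - 1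
          · rw [if_pos h2, decide_eq_true ((memV_iff x y wx wy wo).mpr (Or.inr h2))]; simp
          · rw [if_neg h2]
            have : ¬ (wx, wy, wo) ∈ [((x : Int), y - 1, ("V" : String)), (x, y, "V"), (x, y + 1, "V"), (x - 1, y + 1, "H")] :=
              fun hm => ((memV_iff x y wx wy wo).mp hm).elim h1 h2
            simp [this]
      · rw [if_neg h', hO h h']
        simp


-- ===== VERDICT (by name: the statement is the Claim_ definition above) =====
theorem causes_overlap_spec : Claim_equal_causes_overlap := by
  intro new_wall walls _
  unfold Spec_causes_overlap causes_overlap causes_overlap_alt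
  obtain ⟨x, y, o⟩ := new_wall
  simp only
  by_cases hH : o = "H"
  · subst hH
    rw [if_pos rfl,
      loopA_eq_any x y "H" [(x - 1, y, "H"), (x, y, "H"), (x + 1, y, "H"), (x + 1, y - 1, "V")]
        (fun _ => rfl) (fun h => absurd h (by decide)) (fun h _ => absurd rfl h),
      Bool.eq_iff_iff]
    simp only [List.any_eq_true, decide_eq_true_eq, PySem.Set.contains_iff, PySem.Set.mem_ofList]
    exact ⟨fun ⟨a, h1, h2⟩ => ⟨a, h2, h1⟩, fun ⟨b, h1, h2⟩ => ⟨b, h2, h1⟩⟩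
  · rw [if_neg hH]
    by_cases hV : o = "V"
    · subst hV
      rw [if_pos rfl,
        loopA_eq_any x y "V" [(x, y - 1, "V"), (x, y, "V"), (x, y + 1, "V"), (x - 1, y + 1, "H")]
          (fun h => absurd h (by decide)) (fun _ => rfl) (fun _ h => absurd rfl h),
        Bool.eq_iff_iff]
      simp only [List.any_eq_true, decide_eq_true_eq, PySem.Set.contains_iff, PySem.Set.mem_ofList]
      exact ⟨fun ⟨a, h1, h2⟩ => ⟨a, h2, h1⟩, fun ⟨b, h1, h2⟩ => ⟨b, h2, h1⟩⟩
    · rw [if_neg hV, loopA_eq_any x y o [] (fun h => absurd h hH) (fun h => absurd h hV) (fun _ _ => rfl)]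
      simp
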